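-- pv_equiv track=rewrite | github.com/Michael-YuZong/AI-Fiance | src/commands/strategy.py | _strategy_safe_slug
-- ===== SOURCE A (Python) =====
-- from typing import Any, Dict, List, Mapping, Sequence
--
-- def _strategy_safe_slug(value: Any) -> str:
--     text = str(value or "").strip()
--     if not text:
--         return "all"
--     for old in ("/", "\\", " ", ",", ":", ";"):
--         text = text.replace(old, "_")
--     while "__" in text:
--         text = text.replace("__", "_")
--     return text.strip("_") or "all"
-- ===== SOURCE B (Python) =====
-- def _strategy_safe_slug(value):
--     text = str(value or "").strip()
--     if not text:
--         return "all"
--     out = []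
--     prev_us = False
--     for ch in text:
--         if ch in ('/', '\\', ' ', ',', ':', ';', '_'):
--             if not prev_us:
--                 out.append('_')
--             prev_us = True
--         else:
--             out.append(ch)
--             prev_us = False
--     return ''.join(out).strip('_') or "all"
-- ===== Notes on version B (the rewrite author's own statement) =====
-- stated objective: alternative
-- what changed: Replaces A's six whole-string replace passes plus the repeated double-underscore-collapse while-loop by one left-to-right traversal that maps separators to underscores and collapses runs using a previous-was-underscore flag.
import Mathlib
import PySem

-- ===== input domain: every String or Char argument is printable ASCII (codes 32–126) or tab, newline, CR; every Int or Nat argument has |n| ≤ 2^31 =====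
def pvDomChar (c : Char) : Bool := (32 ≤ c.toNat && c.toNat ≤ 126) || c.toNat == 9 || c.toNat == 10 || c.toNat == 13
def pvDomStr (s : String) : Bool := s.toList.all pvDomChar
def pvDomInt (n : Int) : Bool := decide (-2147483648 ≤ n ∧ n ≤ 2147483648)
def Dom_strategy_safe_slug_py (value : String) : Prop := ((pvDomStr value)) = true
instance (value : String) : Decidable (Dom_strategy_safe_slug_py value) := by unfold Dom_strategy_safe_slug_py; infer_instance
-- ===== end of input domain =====

-- B replaces A's six-pass replace loop plus the repeated collapse passes by one single
-- left-to-right traversal with an underscore flag (objective: alternative, single-pass algorithm).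

-- ===== PORT A =====
-- Spec-level description of one Python pass `text.replace("__", "_")`, used only to
-- justify termination of the while loop below (proved equal to PySem's replace later).
def ddRep : List Char → List Char
  | [] => []
  | [c] => [c]
  | c :: d :: t => if c = '_' ∧ d = '_' then '_' :: ddRep t else c :: ddRep (d :: t)

theorem replace_go_nil (old new : List Char) (fuel : Nat) (acc : List Char) :
    PySem.Chars.replace.go old new fuel [] acc = acc.reverse := by
  cases fuel <;> simp [PySem.Chars.replace.go]

theorem replace_go_dd (fuel : Nat) (l acc : List Char) (h : l.length ≤ fuel) :
    PySem.Chars.replace.go ['_','_'] ['_'] fuel l acc = acc.reverse ++ ddRep l := by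
  induction fuel generalizing l acc with
  | zero =>
    have : l = [] := by cases l <;> simp_all
    subst this; simp [PySem.Chars.replace.go, ddRep]
  | succ f ih =>
    match l with
    | [] => simp [PySem.Chars.replace.go, ddRep]
    | [c] =>
      by_cases hc : c = '_'
      · subst hc
        simp [PySem.Chars.replace.go, List.isPrefixOf, ddRep, replace_go_nil]
      · simp [PySem.Chars.replace.go, List.isPrefixOf, ddRep, replace_go_nil]
    | c :: d :: t =>
      by_cases hcd : c = '_' ∧ d = '_'
      · obtain ⟨hc, hd⟩ := hcd; subst hc; subst hd
        have := ih t ('_' :: acc) (by simp at h ⊢; omega)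
        simp [PySem.Chars.replace.go, List.isPrefixOf, this, ddRep]
      · have hpre : List.isPrefixOf ['_','_'] (c :: d :: t) = false := by
          simp [List.isPrefixOf]
          intro h1 h2
          exact hcd ⟨h1.symm, h2.symm⟩
        have := ih (d :: t) (c :: acc) (by simp at h ⊢; omega)
        simp [PySem.Chars.replace.go, hpre, this, ddRep, hcd]

theorem replace_dd_eq (l : List Char) :
    PySem.Chars.replace l ['_','_'] ['_'] = ddRep l := by
  have := replace_go_dd l.length l [] (le_refl _)
  simpa [PySem.Chars.replace] using this

theorem length_ddRep_le (l : List Char) : (ddRep l).length ≤ l.length := by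
  fun_induction ddRep l <;> simp_all <;> try omega

theorem length_ddRep_lt (l : List Char) (h : PySem.Chars.isIn ['_','_'] l = true) :
    (ddRep l).length < l.length := by
  obtain ⟨p, q, hpq⟩ := List.infix_iff_prefix_suffix.mp ((PySem.Chars.isIn_iff_infix _ _).mp h)
  -- we only need the existence of an adjacent pair; do induction instead
  clear hpq
  have hinf : ['_','_'] <:+: l := (PySem.Chars.isIn_iff_infix _ _).mp h
  clear h
  obtain ⟨s, t, hst⟩ := hinf
  subst hst
  induction s with
  | nil =>
    show (ddRep ('_' :: '_' :: t)).length < ([] ++ ['_','_'] ++ t).length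
    rw [show ddRep ('_' :: '_' :: t) = '_' :: ddRep t from by simp [ddRep]]
    have := length_ddRep_le t; simp; omega
  | cons a s ih =>
    match s with
    | [] =>
      have h1 := length_ddRep_le ('_' :: t)
      have h2 := length_ddRep_le t
      show (ddRep (a :: '_' :: ('_' :: t))).length < _
      by_cases ha : a = '_'
      · rw [show ddRep (a :: '_' :: ('_' :: t)) = '_' :: ddRep ('_' :: t) from by simp [ddRep, ha]]
        simp at h1 ⊢; omega
      · rw [show ddRep (a :: '_' :: ('_' :: t)) = a :: ddRep ('_' :: '_' :: t) from by simp [ddRep, ha],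
           show ddRep ('_' :: '_' :: t) = '_' :: ddRep t from by simp [ddRep]]
        simp; omega
    | b :: s' =>
      by_cases hab : a = '_' ∧ b = '_'
      · simp [ddRep, hab]
        have := length_ddRep_le (s' ++ ['_','_'] ++ t); simp at this; omega
      · simp [ddRep, hab]
        simpa using ih

-- the Python 'while "__" in text: text = text.replace("__", "_")' loop
def whileCollapseS (t : String) : String :=
  if PySem.Str.isIn "__" t then whileCollapseS (PySem.Str.replace t "__" "_") else t
termination_by t.toList.length
decreasing_by
  rename_i h
  simp only [PySem.Str.toList_replace]
  have h' : PySem.Chars.isIn ['_','_'] t.toList = true := by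
    simpa [PySem.Str.isIn] using h
  simpa [replace_dd_eq] using length_ddRep_lt t.toList h'

def strategy_safe_slug_py (value : String) : String :=
  -- text = str(value or "").strip()
  let text := PySem.Str.strip (if value = "" then "" else value)
  if text = "" then "all"
  else
    -- for old in ("/", "\\", " ", ",", ":", ";"): text = text.replace(old, "_")
    let t1 := PySem.Str.replace text "/" "_"
    let t2 := PySem.Str.replace t1 "\\" "_"
    let t3 := PySem.Str.replace t2 " " "_"
    let t4 := PySem.Str.replace t3 "," "_"
    let t5 := PySem.Str.replace t4 ":" "_"
    let t6 := PySem.Str.replace t5 ";" "_"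
    let t7 := whileCollapseS t6
    let res := PySem.Str.stripChars t7 "_"
    if res = "" then "all" else res

-- ===== PORT B =====
def strategy_safe_slug_py_alt (value : String) : String :=
  let text := PySem.Str.strip (if value = "" then "" else value)
  if text = "" then "all"
  else
    let r := text.toList.foldl
      (fun (s : List Char × Bool) ch =>
        if ch ∈ ['/', '\\', ' ', ',', ':', ';', '_'] then
          (if s.2 then s else (s.1 ++ ['_'], true))
        else (s.1 ++ [ch], false))
      ([], false)
    let res := PySem.Str.stripChars (String.ofList r.1) "_"
    if res = "" then "all" else res

-- ===== PRECONDITION & SPEC =====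
def Spec_strategy_safe_slug_py (value : String) (out : String) : Prop := out = strategy_safe_slug_py_alt value
instance (value : String) (out : String) : Decidable (Spec_strategy_safe_slug_py value out) := by unfold Spec_strategy_safe_slug_py; infer_instance

-- ===== CLAIM (what is proved, stated in full; the proofs are below) =====
def Claim_equal_strategy_safe_slug_py : Prop := ∀ (value : String), Dom_strategy_safe_slug_py value → Spec_strategy_safe_slug_py value (strategy_safe_slug_py value)

-- ===== LEMMAS AND PROOFS =====

-- collapse runs of underscores, `flag` = "previous emitted char was an underscore"
def sqA : Bool → List Char → List Char
  | _, [] => []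
  | flag, c :: t => if c = '_' then (if flag then sqA true t else '_' :: sqA true t) else c :: sqA false t

-- the character map performed by A's replace loop
def fmap (c : Char) : Char := if c ∈ ['/', '\\', ' ', ',', ':', ';'] then '_' else c

theorem replace_go_single (a b : Char) (fuel : Nat) (l acc : List Char) (h : l.length ≤ fuel) :
    PySem.Chars.replace.go [a] [b] fuel l acc
      = acc.reverse ++ l.map (fun c => if c = a then b else c) := by
  induction fuel generalizing l acc with
  | zero =>
    have : l = [] := by cases l <;> simp_all
    subst this; simp [PySem.Chars.replace.go]
  | succ f ih =>
    match l with
    | [] => simp [PySem.Chars.replace.go]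
    | c :: t =>
      by_cases hc : c = a
      · subst hc
        have hpre : List.isPrefixOf [c] (c :: t) = true := by simp [List.isPrefixOf]
        have := ih t (b :: acc) (by simp at h ⊢; omega)
        simp [PySem.Chars.replace.go, hpre, this]
      · have hpre : List.isPrefixOf [a] (c :: t) = false := by
          simp [List.isPrefixOf]; intro h'; exact hc h'.symm
        have := ih t (c :: acc) (by simp at h ⊢; omega)
        simp [PySem.Chars.replace.go, hpre, this, hc]

theorem replace_single (l : List Char) (a b : Char) :
    PySem.Chars.replace l [a] [b] = l.map (fun c => if c = a then b else c) := by
  have := replace_go_single a b l.length l [] (le_refl _)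
  simpa [PySem.Chars.replace] using this

theorem sqA_ddRep (l : List Char) : ∀ flag, sqA flag (ddRep l) = sqA flag l := by
  fun_induction ddRep l with
  | case1 => intro flag; rfl
  | case2 c => intro flag; rfl
  | case3 c d t h ih =>
    obtain ⟨rfl, rfl⟩ := h
    intro flag
    simp [sqA, ih]
  | case4 c d t h ih =>
    intro flag
    by_cases hc : c = '_' <;> simp [sqA, hc, ih]

theorem hasDD_false_sqA (l : List Char) (h : ¬ ['_','_'] <:+: l)
    (flag : Bool) (hf : flag = false ∨ l.head? ≠ some '_') : sqA flag l = l := by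
  induction l generalizing flag with
  | nil => rfl
  | cons c t ih =>
    have htail : ¬ ['_','_'] <:+: t := fun h' => h (h'.trans (List.suffix_cons c t).isInfix)
    by_cases hc : c = '_'
    · subst hc
      have hflag : flag = false := by
        rcases hf with hf | hf
        · exact hf
        · simp at hf
      subst hflag
      have hhead : t.head? ≠ some '_' := by
        intro hh
        apply h
        cases t with
        | nil => simp at hh
        | cons a t' =>
          simp at hh
          subst hh
          exact ⟨[], t', rfl⟩
      simp [sqA, ih htail true (Or.inr hhead)]
    · simp [sqA, hc, ih htail false (Or.inl rfl)]

theorem whileCollapse_eq (l : List Char) :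
    (whileCollapseS (String.ofList l)).toList = sqA false l := by
  rw [whileCollapseS]
  by_cases h : PySem.Chars.isIn ['_','_'] l = true
  · have hcond : PySem.Str.isIn "__" (String.ofList l) = true := by
      simpa [PySem.Str.isIn] using h
    rw [if_pos hcond]
    have harg : PySem.Str.replace (String.ofList l) "__" "_" = String.ofList (ddRep l) := by
      apply String.toList_inj.mp
      simp [PySem.Str.toList_replace]
      exact replace_dd_eq l
    rw [harg, whileCollapse_eq (ddRep l)]
    exact sqA_ddRep l false
  · have hcond : PySem.Str.isIn "__" (String.ofList l) = false := by
      simp [PySem.Str.isIn]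
      exact eq_false_of_ne_true h
    rw [if_neg (ne_true_of_eq_false hcond)]
    simp
    exact (hasDD_false_sqA l (fun h' => h ((PySem.Chars.isIn_iff_infix _ _).mpr h')) false (Or.inl rfl)).symm
termination_by l.length
decreasing_by
  have := length_ddRep_lt l h
  simpa using this

theorem foldB (l : List Char) (out : List Char) (flag : Bool) :
    (l.foldl
      (fun (s : List Char × Bool) ch =>
        if ch ∈ ['/', '\\', ' ', ',', ':', ';', '_'] then
          (if s.2 then s else (s.1 ++ ['_'], true))
        else (s.1 ++ [ch], false))
      (out, flag)).1 = out ++ sqA flag (l.map fmap) := by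
  induction l generalizing out flag with
  | nil => simp [sqA]
  | cons c t ih =>
    by_cases hm : c ∈ ['/', '\\', ' ', ',', ':', ';', '_']
    · have hfc : fmap c = '_' := by
        simp at hm
        rcases hm with rfl | rfl | rfl | rfl | rfl | rfl | rfl <;> rfl
      rw [List.foldl_cons, if_pos hm]
      cases flag with
      | true =>
        rw [if_pos rfl, ih]
        simp [sqA, hfc]
      | false =>
        rw [if_neg (by simp), ih]
        simp [sqA, hfc]
    · have hfc : fmap c = c := by
        simp [fmap]
        intro hh
        simp at hm
        tauto
      have hne : c ≠ '_' := by
        simp at hm; tauto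
      rw [List.foldl_cons, if_neg hm, ih]
      simp [sqA, hfc, hne]

theorem strategy_safe_slug_py_spec : Claim_equal_strategy_safe_slug_py := by
  intro value _
  unfold Spec_strategy_safe_slug_py
  unfold strategy_safe_slug_py strategy_safe_slug_py_alt
  dsimp only
  by_cases ht : PySem.Str.strip (if value = "" then "" else value) = ""
  · rw [if_pos ht, if_pos ht]
  · rw [if_neg ht, if_neg ht]
    set text := PySem.Str.strip (if value = "" then "" else value) with htext
    have hchain : PySem.Str.replace (PySem.Str.replace (PySem.Str.replace (PySem.Str.replace
        (PySem.Str.replace (PySem.Str.replace text "/" "_") "\\" "_") " " "_") "," "_") ":" "_") ";" "_"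
        = String.ofList (text.toList.map fmap) := by
      apply String.toList_inj.mp
      simp only [PySem.Str.toList_replace, String.toList_ofList,
        show ("/" : String).toList = ['/'] from rfl,
        show ("\\" : String).toList = ['\\'] from rfl,
        show (" " : String).toList = [' '] from rfl,
        show ("," : String).toList = [','] from rfl,
        show (":" : String).toList = [':'] from rfl,
        show (";" : String).toList = [';'] from rfl,
        show ("_" : String).toList = ['_'] from rfl,
        replace_single, List.map_map]
      apply List.map_congr_left
      intro c _
      simp only [Function.comp_apply]
      by_cases h1 : c = '/'
      · subst h1; decide
      by_cases h2 : c = '\\'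
      · subst h2; decide
      by_cases h3 : c = ' '
      · subst h3; decide
      by_cases h4 : c = ','
      · subst h4; decide
      by_cases h5 : c = ':'
      · subst h5; decide
      by_cases h6 : c = ';'
      · subst h6; decide
      simp [fmap, h1, h2, h3, h4, h5, h6]
    rw [hchain]
    have hfold := foldB text.toList [] false
    rw [hfold]
    have hw : whileCollapseS (String.ofList (text.toList.map fmap))
        = String.ofList (sqA false (text.toList.map fmap)) := by
      apply String.toList_inj.mp
      rw [whileCollapse_eq]
      simp
    rw [hw, List.nil_append]
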